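-- pv_equiv track=rewrite | github.com/Amin-Gharibi/Data-Structures-HW | hw1/2.py | add_list_numbers
-- ===== SOURCE A (Python) =====
-- arr = [1, 2, 3, 4, 5]
--
-- def add_list_numbers(arr: list, new_arr=None, index=None):
--     if new_arr is None:
--         new_arr = []
--     if index is None:
--         index = 0
--
--     if index == len(arr) - 1:
--         return new_arr
--
--     new_arr.append(arr[index] + arr[index + 1])
--     return add_list_numbers(arr, new_arr, index+1)
-- ===== SOURCE B (Python) =====
-- def add_list_numbers(arr: list, new_arr=None, index=None):
--     # Iterative: one bounded range pass instead of tail recursion.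
--     # Mutates new_arr in place (append), like the original.
--     if new_arr is None:
--         new_arr = []
--     if index is None:
--         index = 0
--     for j in range(index, len(arr) - 1):
--         new_arr.append(arr[j] + arr[j + 1])
--     return new_arr
-- ===== Notes on version B (the rewrite author's own statement) =====
-- stated objective: idiomatic
-- what changed: Replaced the tail recursion that threads an accumulator and index through call frames with a single bounded for-loop over range(index, len(arr)-1); same appends, no recursion.
import Mathlib
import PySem

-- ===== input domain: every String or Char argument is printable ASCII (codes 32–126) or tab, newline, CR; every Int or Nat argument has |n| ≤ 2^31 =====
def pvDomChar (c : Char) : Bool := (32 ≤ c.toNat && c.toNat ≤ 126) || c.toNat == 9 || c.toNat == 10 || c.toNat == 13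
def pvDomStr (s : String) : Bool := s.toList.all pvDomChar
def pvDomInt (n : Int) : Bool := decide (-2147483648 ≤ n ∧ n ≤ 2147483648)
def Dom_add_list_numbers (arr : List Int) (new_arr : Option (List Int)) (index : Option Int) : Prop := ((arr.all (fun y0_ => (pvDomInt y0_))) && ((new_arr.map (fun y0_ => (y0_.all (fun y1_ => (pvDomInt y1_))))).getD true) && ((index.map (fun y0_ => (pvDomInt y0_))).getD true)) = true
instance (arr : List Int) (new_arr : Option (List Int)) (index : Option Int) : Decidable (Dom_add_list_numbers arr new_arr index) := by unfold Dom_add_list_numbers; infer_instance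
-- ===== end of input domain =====

-- ===== PORT A =====
-- B replaces A's tail recursion by one for-loop over range(index, len(arr)-1); return-value
-- equivalence only — both Pythons mutate new_arr in place identically (append per step).
-- fuel makes the recursion total; inside Pre_ the loop runs at most 2*len(arr) steps.
def addA_loop (fuel : Nat) (arr : List Int) (acc : List Int) (i : Int) : List Int :=
  match fuel with
  | 0 => acc
  | f + 1 =>
    if i = (arr.length : Int) - 1 then acc
    else
      match PySem.List.pyGet? arr i, PySem.List.pyGet? arr (i + 1) with
      | some a, some b => addA_loop f arr (acc ++ [a + b]) (i + 1)
      | _, _ => acc   -- IndexError: outside Pre_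

def add_list_numbers (arr : List Int) (new_arr : Option (List Int)) (index : Option Int) : List Int :=
  addA_loop (2 * arr.length + 1) arr (new_arr.getD []) (index.getD 0)

-- ===== PORT B =====
def add_list_numbers_alt (arr : List Int) (new_arr : Option (List Int)) (index : Option Int) : List Int :=
  let na := new_arr.getD []
  let i := index.getD 0
  na ++ (PySem.List.pyRange i ((arr.length : Int) - 1)).map
    (fun j => PySem.List.pyGetD arr j 0 + PySem.List.pyGetD arr (j + 1) 0)

-- ===== PRECONDITION & SPEC =====
-- Pre_: exactly the inputs on which A returns (no IndexError): the effective index is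
-- len(arr)-1 (immediate return) or a valid (possibly negative) Python index below it.
def Pre_add_list_numbers (arr : List Int) (new_arr : Option (List Int)) (index : Option Int) : Prop :=
  index.getD 0 = (arr.length : Int) - 1 ∨
    (-(arr.length : Int) ≤ index.getD 0 ∧ index.getD 0 ≤ (arr.length : Int) - 1)
instance (arr : List Int) (new_arr : Option (List Int)) (index : Option Int) : Decidable (Pre_add_list_numbers arr new_arr index) := by unfold Pre_add_list_numbers; infer_instance
def pvWitness_add_list_numbers : List Int × Option (List Int) × Option Int := ([1, 2, 3, 4, 5], none, none)

def Spec_add_list_numbers (arr : List Int) (new_arr : Option (List Int)) (index : Option Int) (out : List Int) : Prop := out = add_list_numbers_alt arr new_arr index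
instance (arr : List Int) (new_arr : Option (List Int)) (index : Option Int) (out : List Int) : Decidable (Spec_add_list_numbers arr new_arr index out) := by unfold Spec_add_list_numbers; infer_instance

-- ===== CLAIM (what is proved, stated in full; the proofs are below) =====
def Claim_equal_add_list_numbers : Prop := ∀ (arr : List Int) (new_arr : Option (List Int)) (index : Option Int), Dom_add_list_numbers arr new_arr index → Pre_add_list_numbers arr new_arr index → Spec_add_list_numbers arr new_arr index (add_list_numbers arr new_arr index)

-- ===== LEMMAS AND PROOFS =====

lemma pyRange_one_nil {a b : Int} (h : b ≤ a) : PySem.List.pyRange a b = [] := by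
  simp [PySem.List.pyRange]; omega

lemma pyGet?_of_inrange (arr : List Int) (i : Int) (h1 : -(arr.length : Int) ≤ i)
    (h2 : i < (arr.length : Int)) : PySem.List.pyGet? arr i = some (PySem.List.pyGetD arr i 0) := by
  rcases h : PySem.List.pyGet? arr i with _ | a
  · rw [PySem.List.pyGet?_eq_none_iff] at h
    exact absurd (by simp [PySem.Raise.InRange]; omega) h
  · simp [PySem.List.pyGetD, h]

lemma addA_loop_eq (arr : List Int) (fuel : Nat) (acc : List Int) (i : Int)
    (h1 : -(arr.length : Int) ≤ i) (h2 : i ≤ (arr.length : Int) - 1)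
    (hf : ((arr.length : Int) - 1 - i).toNat < fuel) :
    addA_loop fuel arr acc i =
      acc ++ (PySem.List.pyRange i ((arr.length : Int) - 1)).map
        (fun j => PySem.List.pyGetD arr j 0 + PySem.List.pyGetD arr (j + 1) 0) := by
  induction fuel generalizing acc i with
  | zero => omega
  | succ f ih =>
    by_cases hi : i = (arr.length : Int) - 1
    · simp [addA_loop, hi, pyRange_one_nil (le_refl _)]
    · have hlt : i < (arr.length : Int) - 1 := by omega
      rw [PySem.List.pyRange_one_cons hlt]
      have g1 := pyGet?_of_inrange arr i h1 (by omega)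
      have g2 := pyGet?_of_inrange arr (i + 1) (by omega) (by omega)
      simp only [addA_loop, hi, if_false, g1, g2]
      rw [ih (acc ++ [_]) (i + 1) (by omega) (by omega) (by omega)]
      simp

-- ===== VERDICT (by name: the statement is the Claim_ definition above) =====
theorem add_list_numbers_spec : Claim_equal_add_list_numbers := by
  intro arr new_arr index _ hpre
  unfold Spec_add_list_numbers add_list_numbers add_list_numbers_alt
  rcases hpre with h | h
  · -- immediate return: i = len-1 (covers the empty list, where index -1 returns at once)
    simp [addA_loop, h, pyRange_one_nil (le_refl ((arr.length : Int) - 1))]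
  · exact addA_loop_eq arr _ _ _ h.1 h.2 (by omega)
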